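-- pv_equiv track=rewrite | github.com/mhulden/pyfoma | src/pyfoma/lexd.py | _split_selector_suffix
-- ===== SOURCE A (Python) =====
-- def _split_selector_suffix(tok: str) -> tuple[str, str | None]:
--     """Split a trailing tag-selector suffix '[...]' from a token, supporting nested brackets.
--
--     Examples:
--       'A[count]' -> ('A', '[count]')
--       'A[|[a,b]]' -> ('A', '[|[a,b]]')
--       '(A B)[^[x,y]]' (handled at expr level, but same logic)
--     """
--     tok = tok.strip()
--     if not tok.endswith(']'):
--         return tok, None
--     depth = 0
--     for i in range(len(tok) - 1, -1, -1):
--         c = tok[i]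
--         if c == ']':
--             depth += 1
--         elif c == '[':
--             depth -= 1
--             if depth == 0:
--                 return tok[:i], tok[i:]
--     return tok, None
-- ===== SOURCE B (Python) =====
-- def _split_selector_suffix(tok: str) -> tuple[str, str | None]:
--     # Single forward pass instead of A's backward depth scan: the split point is
--     # the last '[' whose prefix bracket-balance equals the whole token's balance
--     # (i.e. the suffix from it is bracket-balanced).
--     tok = tok.strip()
--     if not tok.endswith(']'):
--         return tok, None
--     total = 0
--     for c in tok:
--         if c == ']':
--             total += 1
--         elif c == '[':
--             total -= 1
--     bal = 0
--     best = None
--     for i, c in enumerate(tok):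
--         if c == '[':
--             if bal == total:
--                 best = i
--             bal -= 1
--         elif c == ']':
--             bal += 1
--     if best is None:
--         return tok, None
--     return tok[:best], tok[best:]
-- ===== Notes on version B (the rewrite author's own statement) =====
-- stated objective: alternative
-- what changed: A scans backward from the end counting bracket depth until it hits zero; B makes a forward pass keeping a running prefix bracket-balance and remembers the last opening bracket whose suffix is bracket-balanced (prefix balance equals the whole token's balance).
import Mathlib
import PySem

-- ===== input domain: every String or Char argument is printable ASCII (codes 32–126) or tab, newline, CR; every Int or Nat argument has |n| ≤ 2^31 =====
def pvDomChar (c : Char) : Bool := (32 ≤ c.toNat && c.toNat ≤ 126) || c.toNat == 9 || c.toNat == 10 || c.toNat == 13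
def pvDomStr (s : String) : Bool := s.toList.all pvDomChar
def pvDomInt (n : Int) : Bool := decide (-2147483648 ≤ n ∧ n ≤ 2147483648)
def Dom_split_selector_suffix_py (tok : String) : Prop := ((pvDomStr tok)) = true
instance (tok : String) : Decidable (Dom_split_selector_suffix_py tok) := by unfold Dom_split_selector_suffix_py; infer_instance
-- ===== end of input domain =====

-- B replaces A's backward depth scan with a forward pass that keeps a running
-- prefix bracket-balance and remembers the last '[' whose suffix is balanced
-- (objective: alternative decomposition, same cost).

-- ===== PORT A =====
-- A's loop `for i in range(len(tok)-1, -1, -1)` visits tok's characters from the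
-- last to the first; we transliterate it as structural recursion over the
-- REVERSED character list: the same characters in the same order with the same
-- `depth` state, and `rest.length` is exactly the Python index i of the current
-- character (remaining-to-visit count).
def pvAScan : List Char → Int → Option Nat
  | [], _ => none
  | c :: rest, depth =>
    if c = ']' then pvAScan rest (depth + 1)
    else if c = '[' then
      -- Python: depth -= 1; if depth == 0: return i
      if depth - 1 = 0 then some rest.length
      else pvAScan rest (depth - 1)
    else pvAScan rest depth

def split_selector_suffix_py (tok : String) : String × Option String :=
  let t := PySem.Str.strip tok
  if PySem.Str.endswith t "]" then
    match pvAScan t.toList.reverse 0 with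
    | some i => (String.mk (t.toList.take i), some (String.mk (t.toList.drop i)))  -- tok[:i], tok[i:] (i in range)
    | none => (t, none)
  else (t, none)

-- ===== PORT B =====
-- the `total` loop of Source B: if c == ']': total += 1 elif c == '[': total -= 1
def pvStep (a : Int) (c : Char) : Int := if c = ']' then a + 1 else if c = '[' then a - 1 else a

-- the enumerate loop of Source B: state (i, bal, best)
def pvBScan (total : Int) : List Char → Nat → Int → Option Nat → Option Nat
  | [], _, _, best => best
  | c :: rest, i, bal, best =>
    if c = '[' then pvBScan total rest (i + 1) (bal - 1) (if bal = total then some i else best)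
    else if c = ']' then pvBScan total rest (i + 1) (bal + 1) best
    else pvBScan total rest (i + 1) bal best

def split_selector_suffix_py_alt (tok : String) : String × Option String :=
  let t := PySem.Str.strip tok
  if PySem.Str.endswith t "]" then
    let total := t.toList.foldl pvStep 0
    match pvBScan total t.toList 0 0 none with
    | some i => (String.mk (t.toList.take i), some (String.mk (t.toList.drop i)))  -- tok[:best], tok[best:]
    | none => (t, none)
  else (t, none)

-- ===== PRECONDITION & SPEC =====
def Spec_split_selector_suffix_py (tok : String) (out : String × Option String) : Prop :=
  out = split_selector_suffix_py_alt tok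
instance (tok : String) (out : String × Option String) : Decidable (Spec_split_selector_suffix_py tok out) := by
  unfold Spec_split_selector_suffix_py; infer_instance

-- ===== CLAIM =====
def Claim_equal_split_selector_suffix_py : Prop :=
  ∀ (tok : String), Dom_split_selector_suffix_py tok →
    Spec_split_selector_suffix_py tok (split_selector_suffix_py tok)

-- ===== LEMMAS AND PROOFS =====
-- bracket balance of a character list (#']' − #'['), recursion on the front
def pvBal : List Char → Int
  | [] => 0
  | c :: rest => (if c = ']' then 1 else if c = '[' then -1 else 0) + pvBal rest

theorem pvBal_append (xs ys : List Char) : pvBal (xs ++ ys) = pvBal xs + pvBal ys := by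
  induction xs with
  | nil => simp [pvBal]
  | cons c xs ih => simp [pvBal, ih]; ring

theorem pvBal_reverse (xs : List Char) : pvBal xs.reverse = pvBal xs := by
  induction xs with
  | nil => rfl
  | cons c xs ih => simp [pvBal, List.reverse_cons, pvBal_append, ih]; ring

theorem pvFoldl_step (l : List Char) (a : Int) : l.foldl pvStep a = a + pvBal l := by
  induction l generalizing a with
  | nil => simp [pvBal]
  | cons c l ih => simp [List.foldl, pvStep, pvBal, ih]; split_ifs <;> ring

theorem pvAScan_append (xs ys : List Char) (d : Int) :
    pvAScan (xs ++ ys) d =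
      match pvAScan xs d with
      | some j => some (j + ys.length)
      | none => pvAScan ys (d + pvBal xs) := by
  induction xs generalizing d with
  | nil => simp [pvAScan, pvBal]
  | cons c xs ih =>
    by_cases h1 : c = ']'
    · simp [pvAScan, h1, ih, pvBal]
      have : d + (1 + pvBal xs) = d + 1 + pvBal xs := by ring
      rw [this]
    · by_cases h2 : c = '['
      · by_cases h3 : d - 1 = 0
        · simp [pvAScan, h2, h3, List.length_append]
        · simp [pvAScan, h2, h3, ih, pvBal]
          have : d + (-1 + pvBal xs) = d - 1 + pvBal xs := by ring
          rw [this]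
      · simp [pvAScan, h1, h2, ih, pvBal]

-- the central correspondence: the forward scan with running prefix balance
-- computes exactly what the backward depth scan returns (indices shifted by i)
theorem pvScan_corr (l : List Char) (i : Nat) (b total : Int) (best : Option Nat)
    (hinv : total = b + pvBal l) :
    pvBScan total l i b best =
      match pvAScan l.reverse 0 with
      | some j => some (j + i)
      | none => best := by
  induction l generalizing i b best with
  | nil => simp [pvBScan, pvAScan]
  | cons c rest ih =>
    have hrev : (c :: rest).reverse = rest.reverse ++ [c] := by simp
    rw [hrev, pvAScan_append]
    by_cases h2 : c = '['
    · have hb : total = (b - 1) + pvBal rest := by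
        simp [pvBal, h2] at hinv; omega
      have := ih (i + 1) (b - 1) (if b = total then some i else best) hb
      simp only [pvBScan, h2, if_true, this]
      cases h : pvAScan rest.reverse 0 with
      | some j => simp; omega
      | none =>
        have hd : (0 : Int) + pvBal rest.reverse = pvBal rest := by
          rw [pvBal_reverse]; ring
        simp only [hd]
        by_cases hfire : pvBal rest - 1 = 0
        · have hbt : b = total := by omega
          simp [pvAScan, hfire, hbt]
        · have hbt : ¬ b = total := by omega
          simp [pvAScan, hfire, hbt]
    · by_cases h1 : c = ']'
      · have hb : total = (b + 1) + pvBal rest := by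
          simp [pvBal, h1] at hinv; omega
        have := ih (i + 1) (b + 1) best hb
        simp only [pvBScan, h1, if_true, this]
        cases h : pvAScan rest.reverse 0 with
        | some j => simp; omega
        | none =>
          have hd : (0 : Int) + pvBal rest.reverse = pvBal rest := by
            rw [pvBal_reverse]; ring
          simp [pvAScan]
      · have hb : total = b + pvBal rest := by
          simp [pvBal, h1, h2] at hinv; omega
        have := ih (i + 1) b best hb
        simp only [pvBScan, h1, h2, if_false, this]
        cases h : pvAScan rest.reverse 0 with
        | some j => simp; omega
        | none =>
          have hd : (0 : Int) + pvBal rest.reverse = pvBal rest := by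
            rw [pvBal_reverse]; ring
          simp [pvAScan, h1, h2]

-- ===== VERDICT =====
theorem split_selector_suffix_py_spec : Claim_equal_split_selector_suffix_py := by
  intro tok _
  unfold Spec_split_selector_suffix_py split_selector_suffix_py split_selector_suffix_py_alt
  have key : pvBScan ((PySem.Str.strip tok).toList.foldl pvStep 0)
      (PySem.Str.strip tok).toList 0 0 none
      = pvAScan (PySem.Str.strip tok).toList.reverse 0 := by
    rw [pvScan_corr _ _ _ _ _ (by rw [pvFoldl_step])]
    cases pvAScan (PySem.Str.strip tok).toList.reverse 0 with
    | some j => simp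
    | none => rfl
  dsimp only
  rw [key]
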